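-- pv_equiv track=rewrite | github.com/JKottonen/Tiral-k2022-assignments | viikko-2/splitlist2.py | count
-- ===== SOURCE A (Python) =====
-- def count(t):
--     splits = 0
--     length = len(t)
--     for i in range(1,length):
--         tA = t[:i]
--         tB = t[i:]
--
--         for j in tA:
--             for x in tB:
--                 if j > x:
--                     continue
--                 else:
--                     splits += 1
--     return splits
-- ===== SOURCE B (Python) =====
-- def count(t):
--     # One pass over index pairs: the pair (p, q), p < q, with t[p] <= t[q]
--     # is counted once by A for each split point i with p < i <= q,
--     # i.e. q - p times, so sum q - p over those pairs directly.
--     n = len(t)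
--     total = 0
--     for q in range(n):
--         for p in range(q):
--             if t[p] <= t[q]:
--                 total += q - p
--     return total
-- ===== Notes on version B (the rewrite author's own statement) =====
-- stated objective: faster
-- what changed: Replaces the split loop with its per-slice quadratic pair scan by a single pass over ordered index pairs, adding q-p for each pair p<q with t[p]<=t[q] (each such pair is counted once per split separating it).
import Mathlib
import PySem

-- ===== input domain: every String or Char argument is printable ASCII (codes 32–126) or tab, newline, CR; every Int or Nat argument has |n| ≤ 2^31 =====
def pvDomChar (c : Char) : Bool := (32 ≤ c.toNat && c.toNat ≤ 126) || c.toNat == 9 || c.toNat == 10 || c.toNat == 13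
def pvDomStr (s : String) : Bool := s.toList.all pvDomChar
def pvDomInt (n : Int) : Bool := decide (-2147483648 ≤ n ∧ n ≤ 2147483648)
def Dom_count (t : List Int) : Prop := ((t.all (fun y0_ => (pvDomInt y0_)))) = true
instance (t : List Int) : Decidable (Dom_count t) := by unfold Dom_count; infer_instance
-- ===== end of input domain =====

-- B replaces A's cubic loop over splits with one quadratic pass over ordered
-- index pairs, adding q-p per pair p<q with t[p] <= t[q] (objective: faster).

-- ===== PORT A =====
def count (t : List Int) : Int :=
  let length : Int := (t.length : Int)
  (PySem.List.pyRange 1 length 1).foldl (fun splits i =>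
    let tA := PySem.List.slice t none (some i)
    let tB := PySem.List.slice t (some i) none
    tA.foldl (fun s j =>
      tB.foldl (fun s x => if j > x then s else s + 1) s) splits) 0

-- ===== PORT B =====
def count_alt (t : List Int) : Int :=
  let n : Int := (t.length : Int)
  (PySem.List.pyRange 0 n 1).foldl (fun total q =>
    (PySem.List.pyRange 0 q 1).foldl (fun total p =>
      if PySem.List.pyGetD t p 0 ≤ PySem.List.pyGetD t q 0 then total + (q - p)
      else total) total) 0

-- ===== PRECONDITION & SPEC =====
def Spec_count (t : List Int) (out : Int) : Prop := out = count_alt t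
instance (t : List Int) (out : Int) : Decidable (Spec_count t out) := by unfold Spec_count; infer_instance

-- ===== CLAIM (what is proved, stated in full; the proofs are below) =====
def Claim_equal_count : Prop := ∀ (t : List Int), Dom_count t → Spec_count t (count t)

-- ===== LEMMAS AND PROOFS =====

/-- Sum of `f` over `0,…,n-1`, as a list sum. -/
def sumR (n : Nat) (f : Nat → Int) : Int := ((List.range n).map f).sum

theorem sumR_zero (f : Nat → Int) : sumR 0 f = 0 := rfl

theorem sumR_zero_fun (n : Nat) : sumR n (fun _ => (0:Int)) = 0 := by
  simp [sumR]

theorem sumR_succ (n : Nat) (f : Nat → Int) : sumR (n+1) f = sumR n f + f n := by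
  simp [sumR, List.range_succ]

theorem sumR_congr {n : Nat} {f g : Nat → Int} (h : ∀ i, i < n → f i = g i) :
    sumR n f = sumR n g := by
  unfold sumR
  congr 1
  exact List.map_congr_left (fun i hi => h i (List.mem_range.mp hi))

theorem sumR_add (n : Nat) (f g : Nat → Int) :
    sumR n (fun i => f i + g i) = sumR n f + sumR n g := by
  induction n with
  | zero => rfl
  | succ n ih => simp [sumR_succ, ih]; ring

/-- Fold of A's innermost loop body. -/
theorem foldl_skip (j : Int) (l : List Int) (s : Int) :
    l.foldl (fun s x => if j > x then s else s + 1) s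
      = s + (l.map (fun x => if j ≤ x then (1:Int) else 0)).sum := by
  induction l generalizing s with
  | nil => simp
  | cons a l ih =>
    simp only [List.foldl_cons, List.map_cons, List.sum_cons, ih]
    split_ifs with h1 h2 h2 <;> [skip; skip; skip; skip] <;> omega

/-- Fold of B's inner loop body. -/
theorem foldl_ite_add {α : Type} (P : α → Prop) [DecidablePred P] (f : α → Int) (l : List α) (s : Int) :
    l.foldl (fun s x => if P x then s + f x else s) s
      = s + (l.map (fun x => if P x then f x else 0)).sum := by
  induction l generalizing s with
  | nil => simp
  | cons a l ih =>
    simp only [List.foldl_cons, List.map_cons, List.sum_cons, ih]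
    split_ifs <;> ring

/-- A list sum of `f` over the elements, as an indexed sum. -/
theorem sum_map_eq_sumR (l : List Int) (f : Int → Int) :
    (l.map f).sum = sumR l.length (fun p => f (l.getD p 0)) := by
  induction l using List.reverseRecOn with
  | nil => rfl
  | append_singleton l a ih =>
    have hlen : (l ++ [a]).length = l.length + 1 := by simp
    rw [hlen, sumR_succ]
    have h1 : ∀ i, i < l.length → (l ++ [a]).getD i 0 = l.getD i 0 := by
      intro i hi
      simp [List.getD_eq_getElem?_getD, List.getElem?_append_left hi]
    have h2 : (l ++ [a]).getD l.length 0 = a := by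
      simp [List.getD_eq_getElem?_getD]
    rw [sumR_congr (fun i hi => by rw [h1 i hi]), h2, ← ih]
    simp

theorem getD_take (t : List Int) (m p : Nat) (hp : p < m) :
    (t.take m).getD p 0 = t.getD p 0 := by
  simp [List.getD_eq_getElem?_getD, hp]

theorem getD_drop (t : List Int) (m j : Nat) :
    (t.drop m).getD j 0 = t.getD (m + j) 0 := by
  simp [List.getD_eq_getElem?_getD, List.getElem?_drop]

/-- Triangle helper: each `p < n` is counted for every `k` with `p ≤ k < n`. -/
theorem triangle (n : Nat) (f : Nat → Int) :
    sumR n (fun k => sumR (k+1) (fun p => f p))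
      = sumR n (fun p => ((n:Int) - p) * f p) := by
  induction n with
  | zero => rfl
  | succ n ih =>
    rw [sumR_succ, ih, sumR_succ, sumR_succ]
    have : sumR n (fun p => ((↑(n+1):Int) - ↑p) * f p)
        = sumR n (fun p => ((n:Int) - ↑p) * f p + f p) := by
      apply sumR_congr; intro i hi; push_cast; ring
    rw [this, sumR_add]
    push_cast; ring

/-- Double counting: summing over splits equals summing `q - p` over pairs. -/
theorem key (n : Nat) (c : Nat → Nat → Int) :
    sumR n (fun k => sumR (k+1) (fun p => sumR (n-(k+1)) (fun j => c p (k+1+j))))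
      = sumR n (fun q => sumR q (fun p => ((q:Int) - p) * c p q)) := by
  induction n with
  | zero => rfl
  | succ n ih =>
    rw [sumR_succ]
    rw [show n+1-(n+1) = 0 from by omega]
    simp only [sumR_zero, sumR_zero_fun, add_zero]
    rw [sumR_succ n (fun q => sumR q (fun p => ((q:Int) - p) * c p q))]
    have hstep : sumR n (fun k => sumR (k+1) (fun p => sumR (n+1-(k+1)) (fun j => c p (k+1+j))))
        = sumR n (fun k => sumR (k+1) (fun p => sumR (n-(k+1)) (fun j => c p (k+1+j)) + c p n)) := by
      apply sumR_congr; intro k hk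
      apply sumR_congr; intro p hp
      have h1 : n + 1 - (k+1) = (n - (k+1)) + 1 := by omega
      rw [h1, sumR_succ]
      have h2 : k+1+(n-(k+1)) = n := by omega
      rw [h2]
    have hsplit : ∀ k, k < n →
        sumR (k+1) (fun p => sumR (n-(k+1)) (fun j => c p (k+1+j)) + c p n)
          = sumR (k+1) (fun p => sumR (n-(k+1)) (fun j => c p (k+1+j)))
            + sumR (k+1) (fun p => c p n) := by
      intro k _; exact sumR_add _ _ _
    rw [hstep, sumR_congr hsplit, sumR_add, ih, triangle n (fun p => c p n)]

/-- Value of A's body for split index `i = 1 + k`, as an indexed double sum. -/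
theorem outerA_body (t : List Int) (k : Nat) (hk : k + 1 ≤ t.length) (splits : Int) :
    (PySem.List.slice t none (some (1+(k:Int)))).foldl (fun s j =>
        (PySem.List.slice t (some (1+(k:Int))) none).foldl
          (fun s x => if j > x then s else s + 1) s) splits
      = splits + sumR (k+1) (fun p => sumR (t.length-(k+1))
          (fun j => if t.getD p 0 ≤ t.getD (k+1+j) 0 then (1:Int) else 0)) := by
  rw [PySem.List.slice_to t (by positivity), PySem.List.slice_from t (by positivity),
      show ((1:Int)+(k:Int)).toNat = k+1 from by omega]
  simp only [foldl_skip]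
  rw [PySem.List.foldl_add]
  congr 1
  rw [sum_map_eq_sumR]
  rw [show (t.take (k+1)).length = k+1 from by simp; omega]
  apply sumR_congr; intro p hp
  rw [getD_take t (k+1) p hp, sum_map_eq_sumR, List.length_drop]
  apply sumR_congr; intro j hj
  rw [getD_drop]

/-- Value of B's inner loop for outer index `q`, as an indexed sum. -/
theorem innerB_body (t : List Int) (q : Nat) (total : Int) :
    (PySem.List.pyRange 0 (q:Int) 1).foldl (fun total p =>
        if PySem.List.pyGetD t p 0 ≤ PySem.List.pyGetD t (q:Int) 0 then total + ((q:Int) - p)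
        else total) total
      = total + sumR q (fun p =>
          ((q:Int)-(p:Int)) * (if t.getD p 0 ≤ t.getD q 0 then (1:Int) else 0)) := by
  rw [PySem.List.pyRange_zero_nat, List.foldl_map]
  simp only [PySem.List.pyGetD_natCast]
  rw [foldl_ite_add (fun p : Nat => t.getD p 0 ≤ t.getD q 0) (fun p : Nat => (q:Int) - p)
        (List.range q) total]
  congr 1
  apply sumR_congr; intro p hp
  split_ifs <;> ring

/-- A, written as the canonical triple sum over splits. -/
theorem countA_eq (t : List Int) :
    count t = sumR (t.length - 1) (fun k => sumR (k+1) (fun p => sumR (t.length-(k+1))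
      (fun j => if t.getD p 0 ≤ t.getD (k+1+j) 0 then (1:Int) else 0))) := by
  unfold count
  dsimp only
  rw [PySem.List.pyRange_one, show ((t.length:Int)-1).toNat = t.length - 1 from by omega,
      List.foldl_map]
  rw [PySem.List.foldl_congr_mem _ _ (fun splits k => splits + sumR (k+1)
        (fun p => sumR (t.length-(k+1))
          (fun j => if t.getD p 0 ≤ t.getD (k+1+j) 0 then (1:Int) else 0))) _
      (fun acc k hk => outerA_body t k (by
        have := List.mem_range.mp hk; omega) acc)]
  rw [PySem.List.foldl_add, zero_add]
  rfl

/-- B, written as the canonical pair sum. -/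
theorem countB_eq (t : List Int) :
    count_alt t = sumR t.length (fun q => sumR q (fun p =>
      ((q:Int)-(p:Int)) * (if t.getD p 0 ≤ t.getD q 0 then (1:Int) else 0))) := by
  unfold count_alt
  dsimp only
  rw [PySem.List.pyRange_zero_nat, List.foldl_map]
  rw [PySem.List.foldl_congr_mem _ _ (fun total q => total + sumR q (fun p =>
        ((q:Int)-(p:Int)) * (if t.getD p 0 ≤ t.getD q 0 then (1:Int) else 0))) _
      (fun acc q _ => innerB_body t q acc)]
  rw [PySem.List.foldl_add, zero_add]
  rfl

/-- The split with index `n` contributes nothing, so the outer bound may shrink to `n-1`. -/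
theorem drop_last (n : Nat) (c : Nat → Nat → Int) :
    sumR n (fun k => sumR (k+1) (fun p => sumR (n-(k+1)) (fun j => c p (k+1+j))))
      = sumR (n-1) (fun k => sumR (k+1) (fun p => sumR (n-(k+1)) (fun j => c p (k+1+j)))) := by
  cases n with
  | zero => rfl
  | succ m =>
    rw [sumR_succ, show m+1-(m+1)=0 from by omega]
    simp only [sumR_zero, sumR_zero_fun, add_zero, Nat.succ_sub_one]

-- ===== VERDICT (by name: the statement is the Claim_ definition above) =====
theorem count_spec : Claim_equal_count := by
  intro t _
  unfold Spec_count
  rw [countA_eq, countB_eq,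
      ← key t.length (fun p q => if t.getD p 0 ≤ t.getD q 0 then (1:Int) else 0)]
  exact (drop_last t.length (fun p q => if t.getD p 0 ≤ t.getD q 0 then (1:Int) else 0)).symm
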